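-- pv_equiv track=rewrite | github.com/nbalance97/Programmers | LV 2/삼각 달팽이.py | solution
-- ===== SOURCE A (Python) =====
-- def solution(n):
--     lists = [[0] * i for i in range(1, n+1)]
--     idx = 1
--     i = 0
--     while True:
--         x = 2 * i
--         y = i
--         i += 1
--
--         # 아래 내려가는 부분
--         while x < n and lists[x][y] == 0:
--             lists[x][y] = idx
--             x += 1
--             idx += 1
--         x -= 1
--
--         # 오른쪽 진행
--         y += 1
--         while y < x+1 and lists[x][y] == 0:
--             lists[x][y] = idx
--             y += 1
--             idx += 1
--         y -= 1
--
--         # 대각선 왼쪽 위 진행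
--         x -= 1; y -= 1
--         while lists[x][y] == 0:
--             lists[x][y] = idx
--             x -= 1
--             y -= 1
--             idx += 1
--
--         # 전체 체크
--         end = True
--         for l in lists:
--             for e in l:
--                 if e == 0:
--                     end = False
--                     break
--             if not end:
--                 break
--
--         if end:
--             break
--
--     answer = []
--
--     # 정답 저장
--     for l in lists:
--         for e in l:
--             answer.append(e)
--     return answer
-- ===== SOURCE B (Python) =====
-- def solution(n):
--     tri = [[0] * i for i in range(1, n + 1)]
--     x, y, num = -1, 0, 0
--     for seg in range(n):
--         d = seg % 3
--         for _ in range(n - seg):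
--             if d == 0:
--                 x += 1
--             elif d == 1:
--                 y += 1
--             else:
--                 x -= 1
--                 y -= 1
--             num += 1
--             tri[x][y] = num
--     return [v for row in tri for v in row]
-- ===== Notes on version B (the rewrite author's own statement) =====
-- stated objective: faster
-- what changed: B walks the spiral as n straight segments of known, decreasing lengths (n, n-1, ..., 1) with a direction cycling down/right/up-diagonal, so the per-lap 'cell==0' probes and the full-grid completion rescan after every lap disappear entirely.
-- outside the precondition, e.g. on solution(0): A raises IndexError, B returns []
import Mathlib
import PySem

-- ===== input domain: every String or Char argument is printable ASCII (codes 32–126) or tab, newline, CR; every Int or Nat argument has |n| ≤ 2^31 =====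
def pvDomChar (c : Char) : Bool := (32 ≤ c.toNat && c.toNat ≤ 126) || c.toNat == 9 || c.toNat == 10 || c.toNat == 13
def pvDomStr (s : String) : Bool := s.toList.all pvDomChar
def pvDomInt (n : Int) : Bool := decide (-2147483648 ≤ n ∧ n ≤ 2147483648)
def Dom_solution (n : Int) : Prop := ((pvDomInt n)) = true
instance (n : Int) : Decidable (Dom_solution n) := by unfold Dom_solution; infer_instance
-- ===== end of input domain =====

-- B replaces A's per-cell zero probes and per-lap full-grid completion rescan by n fixed-length
-- straight segments (lengths n, n-1, …, 1; directions cycling down / right / up-left): asymptotically faster.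

-- ===== PORT A =====
-- lists[x][y] (possibly negative index, Python wraparound; none = IndexError, unreachable for n ≥ 1)
def aRead (g : List (List Int)) (x y : Int) : Option Int :=
  (PySem.List.pyGet? g x).bind (fun row => PySem.List.pyGet? row y)

-- lists[x][y] = v  (all of A's writes have 0 ≤ y ≤ x < n, in range)
def aWrite (g : List (List Int)) (x y v : Int) : List (List Int) :=
  PySem.List.pySetD g x (PySem.List.pySetD (PySem.List.pyGetD g x []) y v)

-- while x < n and lists[x][y] == 0: …  (fuel ≥ n+1 suffices: x increases, bounded by n)
def aDown : Nat → List (List Int) → Int → Int → Int → Int → List (List Int) × Int × Int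
  | 0, g, x, _, idx, _ => (g, x, idx)
  | f+1, g, x, y, idx, n =>
    if x < n ∧ aRead g x y = some 0 then aDown f (aWrite g x y idx) (x+1) y (idx+1) n
    else (g, x, idx)

-- while y < x+1 and lists[x][y] == 0: …
def aRight : Nat → List (List Int) → Int → Int → Int → List (List Int) × Int × Int
  | 0, g, _, y, idx => (g, y, idx)
  | f+1, g, x, y, idx =>
    if y < x + 1 ∧ aRead g x y = some 0 then aRight f (aWrite g x y idx) x (y+1) (idx+1)
    else (g, y, idx)

-- while lists[x][y] == 0: …  (a none read — IndexError — stops too; unreachable for n ≥ 1)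
def aDiag : Nat → List (List Int) → Int → Int → Int → List (List Int) × Int
  | 0, g, _, _, idx => (g, idx)
  | f+1, g, x, y, idx =>
    if aRead g x y = some 0 then aDiag f (aWrite g x y idx) (x-1) (y-1) (idx+1)
    else (g, idx)

-- the '전체 체크' scan: end == False  ⟺  some cell is still 0 (break = List.any)
def hasZero (g : List (List Int)) : Bool := g.any (fun l => l.any (fun e => e == 0))

-- one iteration of A's outer while-True body (i is A's i before 'i += 1'; x = 2*i, y = i)
def aLap (n : Int) (g : List (List Int)) (idx i : Int) : List (List Int) × Int :=
  let r1 := aDown (n.toNat+1) g (2*i) i idx n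
  let x1 := r1.2.1 - 1
  let r2 := aRight (n.toNat+1) r1.1 x1 (i+1) r1.2.2
  let y2 := r2.2.1 - 1
  let r3 := aDiag (n.toNat+1) r2.1 (x1-1) (y2-1) r2.2.2
  (r3.1, r3.2)

-- while True: … if end: break  (one fuel per lap; a triangle of side n needs ⌈n/3⌉ ≤ n+1 laps)
def aLoop : Nat → List (List Int) → Int → Int → Int → List (List Int)
  | 0, g, _, _, _ => g
  | f+1, g, idx, i, n =>
    let p := aLap n g idx i
    if hasZero p.1 then aLoop f p.1 p.2 (i+1) n else p.1

def solution (n : Int) : List Int :=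
  -- [[0] * i for i in range(1, n+1)]
  let lists : List (List Int) := (PySem.List.pyRange 1 (n+1) 1).map (fun i => List.replicate i.toNat 0)
  let g := aLoop (n.toNat+1) lists 1 0 n
  -- for l in lists: for e in l: answer.append(e)
  g.foldl (fun acc l => l.foldl (fun a e => a ++ [e]) acc) []

-- ===== PORT B =====
-- tri[x][y] = num
def bWrite (g : List (List Int)) (x y v : Int) : List (List Int) :=
  PySem.List.pySetD g x (PySem.List.pySetD (PySem.List.pyGetD g x []) y v)

-- the body of B's inner 'for _ in range(n - seg)' loop, with d = seg % 3 fixed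
def bStep (d : Int) (st : List (List Int) × Int × Int × Int) : List (List Int) × Int × Int × Int :=
  let g := st.1
  let x := if d = 0 then st.2.1 + 1 else if d = 1 then st.2.1 else st.2.1 - 1
  let y := if d = 0 then st.2.2.1 else if d = 1 then st.2.2.1 + 1 else st.2.2.1 - 1
  let num := st.2.2.2 + 1
  (bWrite g x y num, x, y, num)

-- one 'seg' iteration of B's outer loop
def bSeg (n : Int) (st : List (List Int) × Int × Int × Int) (seg : Int) : List (List Int) × Int × Int × Int :=
  let d := PySem.Int.mod seg 3
  (PySem.List.pyRange 0 (n - seg) 1).foldl (fun st2 _ => bStep d st2) st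

def solution_alt (n : Int) : List Int :=
  -- [[0] * i for i in range(1, n+1)]
  let tri : List (List Int) := (PySem.List.pyRange 1 (n+1) 1).map (fun i => List.replicate i.toNat 0)
  let fin := (PySem.List.pyRange 0 n 1).foldl (bSeg n) (tri, -1, 0, 0)
  -- [v for row in tri for v in row]
  fin.1.flatten

-- ===== PRECONDITION & SPEC =====
-- Pre_ excludes exactly n ≤ 0, on which A raises IndexError (lists[-2] on a too-short triangle).
def Pre_solution (n : Int) : Prop := 1 ≤ n
instance (n : Int) : Decidable (Pre_solution n) := by unfold Pre_solution; infer_instance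
def pvWitness_solution : Int := 3

def Spec_solution (n : Int) (out : List Int) : Prop := out = solution_alt n
instance (n : Int) (out : List Int) : Decidable (Spec_solution n out) := by unfold Spec_solution; infer_instance

-- ===== CLAIM (what is proved, stated in full; the proofs are below) =====
def Claim_equal_solution : Prop := ∀ (n : Int), Dom_solution n → Pre_solution n → Spec_solution n (solution n)

-- ===== LEMMAS AND PROOFS =====

-- ----- proof-only helpers -----

-- shape of the triangle: n rows, row r has r+1 cells
def Shape (n : Int) (g : List (List Int)) : Prop :=
  g.length = n.toNat ∧ ∀ (r : Nat) (row : List Int), g[r]? = some row → row.length = r + 1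

-- spiral ring (depth) of cell (x,y); lap k of the spiral writes exactly the ring-k cells
def ring (n x y : Int) : Int := min y (min (x - y) (n - 1 - x))

-- grid state after k laps: a cell is 0 exactly when its ring is ≥ k (written cells are positive)
def ZInv (n : Int) (k : Nat) (g : List (List Int)) : Prop :=
  ∀ x y : Int, 0 ≤ y → y ≤ x → x < n →
    ∃ v, aRead g x y = some v ∧ (v = 0 ↔ (k : Int) ≤ ring n x y)

-- the straight write-run both programs perform: L cells from (x,y) in direction (dx,dy), values v, v+1, …
def wRun (dx dy : Int) : Nat → List (List Int) → Int → Int → Int → List (List Int)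
  | 0, g, _, _, _ => g
  | L+1, g, x, y, v => wRun dx dy L (aWrite g x y v) (x+dx) (y+dy) (v+1)

lemma aRead_nonneg (g : List (List Int)) (x y : Int) (hx : 0 ≤ x) (hy : 0 ≤ y) :
    aRead g x y = (g[x.toNat]?).bind (fun row => row[y.toNat]?) := by
  unfold aRead
  rw [PySem.List.pyGet?_of_nonneg _ hx]
  cases h : g[x.toNat]? with
  | none => simp
  | some row => simp [PySem.List.pyGet?_of_nonneg _ hy]

lemma aWrite_eq_set (g : List (List Int)) (x y v : Int) (hx : 0 ≤ x) (hy : 0 ≤ y)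
    (hlen : x < g.length) :
    aWrite g x y v = g.set x.toNat ((g[x.toNat]'(by omega)).set y.toNat v) := by
  unfold aWrite
  rw [PySem.List.pySetD_of_nonneg _ _ hx, PySem.List.pySetD_of_nonneg _ _ hy,
    PySem.List.pyGetD_eq_getElem _ _ hx hlen]

lemma Shape_aWrite {n : Int} {g : List (List Int)} (hs : Shape n g) {a b : Int} (v : Int)
    (hb : 0 ≤ b) (ha : 0 ≤ a) (han : a < n) : Shape n (aWrite g a b v) := by
  have hlen : a < g.length := by have := hs.1; omega
  rw [aWrite_eq_set g a b v ha hb hlen]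
  refine ⟨by simpa using hs.1, ?_⟩
  intro r row hr
  rw [List.getElem?_set] at hr
  by_cases hra : a.toNat = r
  · subst hra
    have : a.toNat < g.length := by omega
    rw [if_pos rfl, if_pos this] at hr
    cases hr
    rw [List.length_set]
    exact hs.2 a.toNat _ (List.getElem?_eq_getElem this)
  · rw [if_neg hra] at hr
    exact hs.2 r row hr

lemma aRead_aWrite {n : Int} {g : List (List Int)} (hs : Shape n g) (a b v : Int)
    (hb : 0 ≤ b) (hba : b ≤ a) (han : a < n) (x y : Int) (hx : 0 ≤ x) (hy : 0 ≤ y) :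
    aRead (aWrite g a b v) x y = if x = a ∧ y = b then some v else aRead g x y := by
  have ha : 0 ≤ a := le_trans hb hba
  have hlen : a < g.length := by have := hs.1; omega
  have hlen' : a.toNat < g.length := by omega
  have hrowlen : (g[a.toNat]'hlen').length = a.toNat + 1 :=
    hs.2 a.toNat _ (List.getElem?_eq_getElem hlen')
  rw [aWrite_eq_set g a b v ha hb hlen]
  rw [aRead_nonneg _ _ _ hx hy, aRead_nonneg _ _ _ (by omega : (0:Int) ≤ x) hy]
  rw [List.getElem?_set]
  by_cases hxa : x = a
  · subst hxa
    rw [if_pos rfl, if_pos hlen']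
    simp only [Option.bind_some]
    rw [List.getElem?_set]
    by_cases hyb : y = b
    · rw [if_pos (by omega : b.toNat = y.toNat),
        if_pos (by omega : b.toNat < (g[x.toNat]'hlen').length), if_pos ⟨trivial, hyb⟩]
    · rw [if_neg (by omega : ¬ b.toNat = y.toNat), if_neg (by tauto),
        List.getElem?_eq_getElem hlen']
      simp
  · rw [if_neg (by omega : ¬ a.toNat = x.toNat), if_neg (by tauto)]

lemma Shape_wRun {n : Int} (dx dy : Int) : ∀ (L : Nat) (g : List (List Int)) (x y v : Int),
    Shape n g →
    (∀ j : Nat, j < L → 0 ≤ y + j*dy ∧ y + j*dy ≤ x + j*dx ∧ x + j*dx < n) →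
    Shape n (wRun dx dy L g x y v) := by
  intro L
  induction L with
  | zero => intro g x y v hs _; exact hs
  | succ L ih =>
    intro g x y v hs hr
    have h0 := hr 0 (by omega)
    simp only [Nat.cast_zero, zero_mul, add_zero] at h0
    refine ih (aWrite g x y v) (x+dx) (y+dy) (v+1)
      (Shape_aWrite hs v h0.1 (by omega) h0.2.2) ?_
    intro j hj
    have := hr (j+1) (by omega)
    push_cast at this ⊢
    constructor
    · nlinarith [this.1]
    constructor
    · nlinarith [this.2.1]
    · nlinarith [this.2.2]


lemma wRun_succ (dx dy : Int) (L : Nat) (g : List (List Int)) (x y v : Int) :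
    wRun dx dy (L+1) g x y v = wRun dx dy L (aWrite g x y v) (x+dx) (y+dy) (v+1) := rfl

lemma wRun_read_ne {n : Int} (dx dy : Int) : ∀ (L : Nat) (g : List (List Int)) (x y v : Int),
    Shape n g →
    (∀ j : Nat, j < L → 0 ≤ y + j*dy ∧ y + j*dy ≤ x + j*dx ∧ x + j*dx < n) →
    ∀ x0 y0 : Int, 0 ≤ x0 → 0 ≤ y0 →
    (∀ j : Nat, j < L → ¬(x0 = x + j*dx ∧ y0 = y + j*dy)) →
    aRead (wRun dx dy L g x y v) x0 y0 = aRead g x0 y0 := by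
  intro L
  induction L with
  | zero => intro g x y v _ _ x0 y0 _ _ _; rfl
  | succ L ih =>
    intro g x y v hs hr x0 y0 hx0 hy0 hne
    have h0 := hr 0 (by omega)
    simp only [Nat.cast_zero, zero_mul, add_zero] at h0
    have hstep : ∀ j : Nat, j < L →
        0 ≤ (y+dy) + j*dy ∧ (y+dy) + j*dy ≤ (x+dx) + j*dx ∧ (x+dx) + j*dx < n := by
      intro j hj
      have := hr (j+1) (by omega)
      push_cast at this
      refine ⟨by nlinarith [this.1], by nlinarith [this.2.1], by nlinarith [this.2.2]⟩
    have hne' : ∀ j : Nat, j < L → ¬(x0 = (x+dx) + j*dx ∧ y0 = (y+dy) + j*dy) := by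
      intro j hj hc
      have := hne (j+1) (by omega)
      push_cast at this
      exact this ⟨by linarith [hc.1], by linarith [hc.2]⟩
    rw [wRun_succ]
    rw [ih (aWrite g x y v) (x+dx) (y+dy) (v+1)
      (Shape_aWrite hs v h0.1 (le_trans h0.1 h0.2.1) h0.2.2) hstep x0 y0 hx0 hy0 hne']
    rw [aRead_aWrite hs x y v h0.1 h0.2.1 h0.2.2 x0 y0 hx0 hy0]
    have := hne 0 (by omega)
    simp only [Nat.cast_zero, zero_mul, add_zero] at this
    rw [if_neg this]

lemma wRun_read_at {n : Int} (dx dy : Int)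
    (hdir : (dx = 1 ∧ dy = 0) ∨ (dx = 0 ∧ dy = 1) ∨ (dx = -1 ∧ dy = -1)) :
    ∀ (L j : Nat) (g : List (List Int)) (x y v : Int), j < L →
    Shape n g →
    (∀ j' : Nat, j' < L → 0 ≤ y + j'*dy ∧ y + j'*dy ≤ x + j'*dx ∧ x + j'*dx < n) →
    aRead (wRun dx dy L g x y v) (x + j*dx) (y + j*dy) = some (v + j) := by
  intro L
  induction L with
  | zero => intro j g x y v hj; omega
  | succ L ih =>
    intro j g x y v hj hs hr
    have h0 := hr 0 (by omega)
    simp only [Nat.cast_zero, zero_mul, add_zero] at h0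
    have hs' : Shape n (aWrite g x y v) :=
      Shape_aWrite hs v h0.1 (le_trans h0.1 h0.2.1) h0.2.2
    have hstep : ∀ j' : Nat, j' < L →
        0 ≤ (y+dy) + j'*dy ∧ (y+dy) + j'*dy ≤ (x+dx) + j'*dx ∧ (x+dx) + j'*dx < n := by
      intro j' hj'
      have := hr (j'+1) (by omega)
      push_cast at this
      refine ⟨by nlinarith [this.1], by nlinarith [this.2.1], by nlinarith [this.2.2]⟩
    rw [wRun_succ]
    cases j with
    | zero =>
      simp only [Nat.cast_zero, zero_mul, add_zero]
      rw [wRun_read_ne dx dy L (aWrite g x y v) (x+dx) (y+dy) (v+1) hs' hstep x y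
        (le_trans h0.1 h0.2.1) h0.1 ?_]
      · rw [aRead_aWrite hs x y v h0.1 h0.2.1 h0.2.2 x y (le_trans h0.1 h0.2.1) h0.1]
        simp
      · intro t ht hc
        rcases hdir with ⟨h1, h2⟩ | ⟨h1, h2⟩ | ⟨h1, h2⟩ <;> subst h1 <;> subst h2 <;>
          · obtain ⟨e1, e2⟩ := hc
            omega
    | succ j =>
      have key := ih j (aWrite g x y v) (x+dx) (y+dy) (v+1) (by omega) hs' hstep
      have ex : (x+dx) + (j:Int)*dx = x + ((j:Int)+1)*dx := by ring
      have ey : (y+dy) + (j:Int)*dy = y + ((j:Int)+1)*dy := by ring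
      rw [ex, ey] at key
      push_cast
      rw [key]
      congr 1
      ring

lemma aDown_eq {n : Int} : ∀ (L fuel : Nat) (g : List (List Int)) (x y idx : Int),
    L < fuel → Shape n g →
    (∀ j : Nat, j < L → 0 ≤ y ∧ y ≤ x + j ∧ x + j < n) →
    (∀ j : Nat, j < L → aRead g (x + j) y = some 0) →
    (x + L = n ∨ (0 ≤ y ∧ y ≤ x + L ∧ x + L < n ∧ aRead g (x + L) y ≠ some 0)) →
    aDown fuel g x y idx n = (wRun 1 0 L g x y idx, x + L, idx + L) := by
  intro L
  induction L with
  | zero =>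
    intro fuel g x y idx hf hs hr hz hstop
    obtain ⟨fuel, rfl⟩ : ∃ f, fuel = f + 1 := ⟨fuel - 1, by omega⟩
    show (if x < n ∧ aRead g x y = some 0 then _ else (g, x, idx)) = _
    rw [if_neg ?_]
    · simp [wRun]
    · rcases hstop with h | h
      · rintro ⟨h1, _⟩; omega
      · rintro ⟨_, h2⟩
        simp only [Nat.cast_zero, add_zero] at h
        exact h.2.2.2 h2
  | succ L ih =>
    intro fuel g x y idx hf hs hr hz hstop
    obtain ⟨fuel, rfl⟩ : ∃ f, fuel = f + 1 := ⟨fuel - 1, by omega⟩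
    have h0 := hr 0 (by omega)
    simp only [Nat.cast_zero, add_zero] at h0
    have hz0 := hz 0 (by omega)
    simp only [Nat.cast_zero, add_zero] at hz0
    show (if x < n ∧ aRead g x y = some 0 then
        aDown fuel (aWrite g x y idx) (x+1) y (idx+1) n else (g, x, idx)) = _
    rw [if_pos ⟨h0.2.2, hz0⟩]
    have hs' : Shape n (aWrite g x y idx) :=
      Shape_aWrite hs idx h0.1 (le_trans h0.1 h0.2.1) h0.2.2
    have hrw : ∀ x0 y0 : Int, ¬(x0 = x ∧ y0 = y) → 0 ≤ x0 → 0 ≤ y0 →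
        aRead (aWrite g x y idx) x0 y0 = aRead g x0 y0 := by
      intro x0 y0 hne hx0 hy0
      rw [aRead_aWrite hs x y idx h0.1 h0.2.1 h0.2.2 x0 y0 hx0 hy0, if_neg hne]
    rw [ih fuel (aWrite g x y idx) (x+1) y (idx+1) (by omega) hs' ?_ ?_ ?_]
    · refine Prod.ext ?_ (Prod.ext ?_ ?_)
      · show wRun 1 0 L (aWrite g x y idx) (x+1) y (idx+1)
          = wRun 1 0 L (aWrite g x y idx) (x+1) (y+0) (idx+1)
        norm_num
      · show x + 1 + (L : Int) = x + ((L:Nat)+1 : Nat)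
        push_cast; ring
      · show idx + 1 + (L : Int) = idx + ((L:Nat)+1 : Nat)
        push_cast; ring
    · intro j hj
      have := hr (j+1) (by omega)
      push_cast at this ⊢
      omega
    · intro j hj
      have hzz := hz (j+1) (by omega)
      have hrr := hr (j+1) (by omega)
      push_cast at hrr
      rw [hrw (x+1+j) y (by omega) (by omega) hrr.1]
      have ex : x + 1 + (j:Int) = x + ((j:Int)+1) := by ring
      rw [ex]
      push_cast at hzz ⊢
      exact hzz
    · rcases hstop with h | h
      · left; push_cast at h ⊢; omega
      · right
        push_cast at h ⊢
        refine ⟨h.1, by omega, by omega, ?_⟩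
        rw [hrw (x+1+L) y (by omega) (by omega) h.1]
        have ex : x + 1 + (L:Int) = x + ((L:Int)+1) := by ring
        rw [ex]
        exact h.2.2.2

lemma aRight_eq {n : Int} : ∀ (L fuel : Nat) (g : List (List Int)) (x y idx : Int),
    L < fuel → Shape n g →
    (∀ j : Nat, j < L → 0 ≤ y + j ∧ y + j ≤ x ∧ x < n) →
    (∀ j : Nat, j < L → aRead g x (y + j) = some 0) →
    (y + L = x + 1 ∨ (0 ≤ y + L ∧ y + L ≤ x ∧ x < n ∧ aRead g x (y + L) ≠ some 0)) →
    aRight fuel g x y idx = (wRun 0 1 L g x y idx, y + L, idx + L) := by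
  intro L
  induction L with
  | zero =>
    intro fuel g x y idx hf hs hr hz hstop
    obtain ⟨fuel, rfl⟩ : ∃ f, fuel = f + 1 := ⟨fuel - 1, by omega⟩
    show (if y < x + 1 ∧ aRead g x y = some 0 then _ else (g, y, idx)) = _
    rw [if_neg ?_]
    · simp [wRun]
    · rcases hstop with h | h
      · rintro ⟨h1, _⟩; omega
      · rintro ⟨_, h2⟩
        simp only [Nat.cast_zero, add_zero] at h
        exact h.2.2.2 h2
  | succ L ih =>
    intro fuel g x y idx hf hs hr hz hstop
    obtain ⟨fuel, rfl⟩ : ∃ f, fuel = f + 1 := ⟨fuel - 1, by omega⟩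
    have h0 := hr 0 (by omega)
    simp only [Nat.cast_zero, add_zero] at h0
    have hz0 := hz 0 (by omega)
    simp only [Nat.cast_zero, add_zero] at hz0
    show (if y < x + 1 ∧ aRead g x y = some 0 then
        aRight fuel (aWrite g x y idx) x (y+1) (idx+1) else (g, y, idx)) = _
    rw [if_pos ⟨by omega, hz0⟩]
    have hs' : Shape n (aWrite g x y idx) :=
      Shape_aWrite hs idx h0.1 (le_trans h0.1 h0.2.1) h0.2.2
    have hrw : ∀ x0 y0 : Int, ¬(x0 = x ∧ y0 = y) → 0 ≤ x0 → 0 ≤ y0 →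
        aRead (aWrite g x y idx) x0 y0 = aRead g x0 y0 := by
      intro x0 y0 hne hx0 hy0
      rw [aRead_aWrite hs x y idx h0.1 h0.2.1 h0.2.2 x0 y0 hx0 hy0, if_neg hne]
    rw [ih fuel (aWrite g x y idx) x (y+1) (idx+1) (by omega) hs' ?_ ?_ ?_]
    · refine Prod.ext ?_ (Prod.ext ?_ ?_)
      · show wRun 0 1 L (aWrite g x y idx) x (y+1) (idx+1)
          = wRun 0 1 L (aWrite g x y idx) (x+0) (y+1) (idx+1)
        norm_num
      · show y + 1 + (L : Int) = y + ((L:Nat)+1 : Nat)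
        push_cast; ring
      · show idx + 1 + (L : Int) = idx + ((L:Nat)+1 : Nat)
        push_cast; ring
    · intro j hj
      have := hr (j+1) (by omega)
      push_cast at this ⊢
      omega
    · intro j hj
      have hzz := hz (j+1) (by omega)
      have hrr := hr (j+1) (by omega)
      push_cast at hrr
      rw [hrw x (y+1+j) (by omega) (by omega) (by omega)]
      have ey : y + 1 + (j:Int) = y + ((j:Int)+1) := by ring
      rw [ey]
      push_cast at hzz ⊢
      exact hzz
    · rcases hstop with h | h
      · left; push_cast at h ⊢; omega
      · right
        push_cast at h ⊢
        refine ⟨by omega, by omega, h.2.2.1, ?_⟩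
        rw [hrw x (y+1+L) (by omega) (by omega) (by omega)]
        have ey : y + 1 + (L:Int) = y + ((L:Int)+1) := by ring
        rw [ey]
        exact h.2.2.2

lemma aDiag_eq {n : Int} : ∀ (L fuel : Nat) (g : List (List Int)) (x y idx : Int),
    L < fuel → Shape n g →
    (∀ j : Nat, j < L → 0 ≤ y - j ∧ y - j ≤ x - j ∧ x - j < n) →
    (∀ j : Nat, j < L → aRead g (x - j) (y - j) = some 0) →
    (0 ≤ y - L ∧ y - L ≤ x - L ∧ x - L < n ∧ aRead g (x - L) (y - L) ≠ some 0) →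
    aDiag fuel g x y idx = (wRun (-1) (-1) L g x y idx, idx + L) := by
  intro L
  induction L with
  | zero =>
    intro fuel g x y idx hf hs hr hz hstop
    obtain ⟨fuel, rfl⟩ : ∃ f, fuel = f + 1 := ⟨fuel - 1, by omega⟩
    show (if aRead g x y = some 0 then _ else (g, idx)) = _
    rw [if_neg ?_]
    · simp [wRun]
    · simp only [Nat.cast_zero, sub_zero] at hstop
      exact hstop.2.2.2
  | succ L ih =>
    intro fuel g x y idx hf hs hr hz hstop
    obtain ⟨fuel, rfl⟩ : ∃ f, fuel = f + 1 := ⟨fuel - 1, by omega⟩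
    have h0 := hr 0 (by omega)
    simp only [Nat.cast_zero, sub_zero] at h0
    have hz0 := hz 0 (by omega)
    simp only [Nat.cast_zero, sub_zero] at hz0
    show (if aRead g x y = some 0 then
        aDiag fuel (aWrite g x y idx) (x-1) (y-1) (idx+1) else (g, idx)) = _
    rw [if_pos hz0]
    have hs' : Shape n (aWrite g x y idx) :=
      Shape_aWrite hs idx h0.1 (le_trans h0.1 h0.2.1) h0.2.2
    have hrw : ∀ x0 y0 : Int, ¬(x0 = x ∧ y0 = y) → 0 ≤ x0 → 0 ≤ y0 →
        aRead (aWrite g x y idx) x0 y0 = aRead g x0 y0 := by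
      intro x0 y0 hne hx0 hy0
      rw [aRead_aWrite hs x y idx h0.1 h0.2.1 h0.2.2 x0 y0 hx0 hy0, if_neg hne]
    rw [ih fuel (aWrite g x y idx) (x-1) (y-1) (idx+1) (by omega) hs' ?_ ?_ ?_]
    · refine Prod.ext ?_ ?_
      · show wRun (-1) (-1) L (aWrite g x y idx) (x-1) (y-1) (idx+1)
          = wRun (-1) (-1) L (aWrite g x y idx) (x+(-1)) (y+(-1)) (idx+1)
        simp only [sub_eq_add_neg]
      · show idx + 1 + (L : Int) = idx + ((L:Nat)+1 : Nat)
        push_cast; ring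
    · intro j hj
      have := hr (j+1) (by omega)
      push_cast at this ⊢
      omega
    · intro j hj
      have hzz := hz (j+1) (by omega)
      have hrr := hr (j+1) (by omega)
      push_cast at hrr
      rw [hrw (x-1-j) (y-1-j) (by omega) (by omega) (by omega)]
      have e1 : x - 1 - (j:Int) = x - ((j:Int)+1) := by ring
      have e2 : y - 1 - (j:Int) = y - ((j:Int)+1) := by ring
      rw [e1, e2]
      push_cast at hzz ⊢
      exact hzz
    · push_cast at hstop ⊢
      refine ⟨by omega, by omega, by omega, ?_⟩
      rw [hrw (x-1-L) (y-1-L) (by omega) (by omega) (by omega)]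
      have e1 : x - 1 - (L:Int) = x - ((L:Int)+1) := by ring
      have e2 : y - 1 - (L:Int) = y - ((L:Int)+1) := by ring
      rw [e1, e2]
      exact hstop.2.2.2

-- ----- B-side reshaping -----

lemma foldl_const_fun {α β : Type} (f : β → β) : ∀ (l : List α) (st : β),
    l.foldl (fun s _ => f s) st = f^[l.length] st := by
  intro l
  induction l with
  | nil => intro st; rfl
  | cons a l ih => intro st; simp [List.foldl_cons, ih, Function.iterate_succ_apply]

lemma bSeg_eq_iter (n seg : Int) (st : List (List Int) × Int × Int × Int) :
    bSeg n st seg = (bStep (PySem.Int.mod seg 3))^[(n - seg).toNat] st := by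
  unfold bSeg
  rw [foldl_const_fun]
  congr 1
  rw [PySem.List.length_pyRange_one]
  omega

lemma bSeg_id (n seg : Int) (st : List (List Int) × Int × Int × Int) (h : n ≤ seg) :
    bSeg n st seg = st := by
  unfold bSeg
  rw [PySem.List.pyRange_one_eq_nil (by omega)]
  rfl

lemma bWrite_eq_aWrite : bWrite = aWrite := rfl

lemma bStep_zero (g : List (List Int)) (x y num : Int) :
    bStep 0 (g, x, y, num) = (aWrite g (x+1) y (num+1), x+1, y, num+1) := rfl

lemma bStep_one (g : List (List Int)) (x y num : Int) :
    bStep 1 (g, x, y, num) = (aWrite g x (y+1) (num+1), x, y+1, num+1) := rfl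

lemma bStep_two (g : List (List Int)) (x y num : Int) :
    bStep 2 (g, x, y, num) = (aWrite g (x-1) (y-1) (num+1), x-1, y-1, num+1) := by
  simp [bStep, bWrite_eq_aWrite]

lemma iter_down : ∀ (L : Nat) (g : List (List Int)) (x y num : Int),
    (bStep 0)^[L] (g, x, y, num) = (wRun 1 0 L g (x+1) y (num+1), x + L, y, num + L) := by
  intro L
  induction L with
  | zero => intro g x y num; simp [wRun]
  | succ L ih =>
    intro g x y num
    rw [Function.iterate_succ_apply, bStep_zero, ih, wRun_succ]
    refine Prod.ext ?_ (Prod.ext ?_ (Prod.ext ?_ ?_))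
    · show wRun 1 0 L (aWrite g (x+1) y (num+1)) (x+1+1) y (num+1+1)
        = wRun 1 0 L (aWrite g (x+1) y (num+1)) (x+1+1) (y+0) (num+1+1)
      norm_num
    · show x + 1 + (L : Int) = x + ((L:Nat)+1 : Nat); push_cast; ring
    · rfl
    · show num + 1 + (L : Int) = num + ((L:Nat)+1 : Nat); push_cast; ring

lemma iter_right : ∀ (L : Nat) (g : List (List Int)) (x y num : Int),
    (bStep 1)^[L] (g, x, y, num) = (wRun 0 1 L g x (y+1) (num+1), x, y + L, num + L) := by
  intro L
  induction L with
  | zero => intro g x y num; simp [wRun]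
  | succ L ih =>
    intro g x y num
    rw [Function.iterate_succ_apply, bStep_one, ih, wRun_succ]
    refine Prod.ext ?_ (Prod.ext ?_ (Prod.ext ?_ ?_))
    · show wRun 0 1 L (aWrite g x (y+1) (num+1)) x (y+1+1) (num+1+1)
        = wRun 0 1 L (aWrite g x (y+1) (num+1)) (x+0) (y+1+1) (num+1+1)
      norm_num
    · rfl
    · show y + 1 + (L : Int) = y + ((L:Nat)+1 : Nat); push_cast; ring
    · show num + 1 + (L : Int) = num + ((L:Nat)+1 : Nat); push_cast; ring

lemma iter_diag : ∀ (L : Nat) (g : List (List Int)) (x y num : Int),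
    (bStep 2)^[L] (g, x, y, num) = (wRun (-1) (-1) L g (x-1) (y-1) (num+1), x - L, y - L, num + L) := by
  intro L
  induction L with
  | zero => intro g x y num; simp [wRun]
  | succ L ih =>
    intro g x y num
    rw [Function.iterate_succ_apply, bStep_two, ih, wRun_succ]
    refine Prod.ext ?_ (Prod.ext ?_ (Prod.ext ?_ ?_))
    · show wRun (-1) (-1) L (aWrite g (x-1) (y-1) (num+1)) (x-1-1) (y-1-1) (num+1+1)
        = wRun (-1) (-1) L (aWrite g (x-1) (y-1) (num+1)) (x-1+(-1)) (y-1+(-1)) (num+1+1)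
      simp only [sub_eq_add_neg]
    · show x - 1 - (L : Int) = x - ((L:Nat)+1 : Nat); push_cast; ring
    · show y - 1 - (L : Int) = y - ((L:Nat)+1 : Nat); push_cast; ring
    · show num + 1 + (L : Int) = num + ((L:Nat)+1 : Nat); push_cast; ring

lemma mod3_0 (k : Nat) : PySem.Int.mod (3*(k:Int)) 3 = 0 := by
  simp [PySem.Int.mod, Int.fmod_eq_emod]

lemma mod3_1 (k : Nat) : PySem.Int.mod (3*(k:Int)+1) 3 = 1 := by
  simp [PySem.Int.mod, Int.fmod_eq_emod]

lemma mod3_2 (k : Nat) : PySem.Int.mod (3*(k:Int)+2) 3 = 2 := by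
  simp [PySem.Int.mod, Int.fmod_eq_emod]

-- one full lap of B (segments 3k, 3k+1, 3k+2; those with index ≥ n are no-ops)
def lapB (n : Int) (k : Nat) (st : List (List Int) × Int × Int × Int) :
    List (List Int) × Int × Int × Int :=
  bSeg n (bSeg n (bSeg n st (3*(k:Int))) (3*(k:Int)+1)) (3*(k:Int)+2)

-- the grid produced by lap k on grid g with counter num (L0/L1/L2 cells down/right/diagonally)
def lapG (n : Int) (k : Nat) (g : List (List Int)) (num : Int) : List (List Int) :=
  wRun (-1) (-1) (n-3*(k:Int)-2).toNat
    (wRun 0 1 (n-3*(k:Int)-1).toNat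
      (wRun 1 0 (n-3*(k:Int)).toNat g (2*(k:Int)) (k:Int) (num+1))
      (n-(k:Int)-1) ((k:Int)+1) (num + (n-3*(k:Int)).toNat + 1))
    (n-(k:Int)-2) ((k:Int) + (n-3*(k:Int)-1).toNat - 1)
    (num + (n-3*(k:Int)).toNat + (n-3*(k:Int)-1).toNat + 1)

lemma lapB_val (n : Int) (k : Nat) (g : List (List Int)) (num : Int) (hk : 3*(k:Int) < n) :
    lapB n k (g, 2*(k:Int)-1, (k:Int), num) =
      (lapG n k g num, 2*(k:Int)-1 + ((n-3*(k:Int)).toNat:Int) - ((n-3*(k:Int)-2).toNat:Int),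
        (k:Int) + ((n-3*(k:Int)-1).toNat:Int) - ((n-3*(k:Int)-2).toNat:Int),
        num + ((n-3*(k:Int)).toNat:Int) + ((n-3*(k:Int)-1).toNat:Int) + ((n-3*(k:Int)-2).toNat:Int)) := by
  have h1 : bSeg n (g, 2*(k:Int)-1, (k:Int), num) (3*(k:Int))
      = (wRun 1 0 (n-3*(k:Int)).toNat g (2*(k:Int)) (k:Int) (num+1),
         n-(k:Int)-1, (k:Int), num + ((n-3*(k:Int)).toNat:Int)) := by
    rw [bSeg_eq_iter, mod3_0, iter_down]
    have ex : 2*(k:Int)-1+1 = 2*(k:Int) := by ring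
    rw [ex]
    refine Prod.ext rfl (Prod.ext ?_ rfl)
    show 2*(k:Int)-1 + ((n-3*(k:Int)).toNat:Int) = n-(k:Int)-1
    omega
  have h2 : bSeg n (wRun 1 0 (n-3*(k:Int)).toNat g (2*(k:Int)) (k:Int) (num+1),
         n-(k:Int)-1, (k:Int), num + ((n-3*(k:Int)).toNat:Int)) (3*(k:Int)+1)
      = (wRun 0 1 (n-3*(k:Int)-1).toNat
           (wRun 1 0 (n-3*(k:Int)).toNat g (2*(k:Int)) (k:Int) (num+1))
           (n-(k:Int)-1) ((k:Int)+1) (num + ((n-3*(k:Int)).toNat:Int) + 1),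
         n-(k:Int)-1, (k:Int) + ((n-3*(k:Int)-1).toNat:Int),
         num + ((n-3*(k:Int)).toNat:Int) + ((n-3*(k:Int)-1).toNat:Int)) := by
    rw [bSeg_eq_iter, mod3_1, show n - (3*(k:Int)+1) = n-3*(k:Int)-1 from by ring, iter_right]
  have h3 : bSeg n (wRun 0 1 (n-3*(k:Int)-1).toNat
           (wRun 1 0 (n-3*(k:Int)).toNat g (2*(k:Int)) (k:Int) (num+1))
           (n-(k:Int)-1) ((k:Int)+1) (num + ((n-3*(k:Int)).toNat:Int) + 1),
         n-(k:Int)-1, (k:Int) + ((n-3*(k:Int)-1).toNat:Int),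
         num + ((n-3*(k:Int)).toNat:Int) + ((n-3*(k:Int)-1).toNat:Int)) (3*(k:Int)+2)
      = (lapG n k g num,
         2*(k:Int)-1 + ((n-3*(k:Int)).toNat:Int) - ((n-3*(k:Int)-2).toNat:Int),
         (k:Int) + ((n-3*(k:Int)-1).toNat:Int) - ((n-3*(k:Int)-2).toNat:Int),
         num + ((n-3*(k:Int)).toNat:Int) + ((n-3*(k:Int)-1).toNat:Int) + ((n-3*(k:Int)-2).toNat:Int)) := by
    rw [bSeg_eq_iter, mod3_2, show n - (3*(k:Int)+2) = n-3*(k:Int)-2 from by ring, iter_diag]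
    have ex : n-(k:Int)-1-1 = n-(k:Int)-2 := by ring
    rw [ex]
    refine Prod.ext ?_ (Prod.ext ?_ rfl)
    · unfold lapG
      rfl
    · show n-(k:Int)-1 - ((n-3*(k:Int)-2).toNat:Int)
        = 2*(k:Int)-1 + ((n-3*(k:Int)).toNat:Int) - ((n-3*(k:Int)-2).toNat:Int)
      omega
  show bSeg n (bSeg n (bSeg n _ _) _) _ = _
  rw [h1, h2, h3]

lemma lapA_val (n : Int) (k : Nat) (g : List (List Int)) (num : Int)
    (h2n : 2 ≤ n) (hk : 3*(k:Int) < n) (hs : Shape n g) (hnum : 0 ≤ num) (hI : ZInv n k g) :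
    aLap n g (num+1) (k:Int) =
      (lapG n k g num,
       num + ((n-3*(k:Int)).toNat:Int) + ((n-3*(k:Int)-1).toNat:Int) + ((n-3*(k:Int)-2).toNat:Int) + 1) := by
  unfold ZInv at hI
  have hz : ∀ x y : Int, 0 ≤ y → y ≤ x → x < n → (k:Int) ≤ ring n x y →
      aRead g x y = some 0 := by
    intro x y h1 h3 h4 h5
    obtain ⟨v, hv, hiff⟩ := hI x y h1 h3 h4
    rw [hv, hiff.mpr h5]
  have hnz : ∀ x y : Int, 0 ≤ y → y ≤ x → x < n → ring n x y < (k:Int) →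
      aRead g x y ≠ some 0 := by
    intro x y h1 h3 h4 h5 hcon
    obtain ⟨v, hv, hiff⟩ := hI x y h1 h3 h4
    rw [hv] at hcon
    have : v = 0 := by injection hcon
    have := hiff.mp this
    omega
  -- ----- the down phase -----
  have hL0 : 0 < (n-3*(k:Int)).toNat := by omega
  have hdown := aDown_eq (n := n) (n-3*(k:Int)).toNat (n.toNat+1) g (2*(k:Int)) (k:Int) (num+1)
    (by omega) hs
    (by intro j hj; omega)
    (by
      intro j hj
      apply hz _ _ (by omega) (by omega) (by omega)
      simp only [ring]
      omega)
    (by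
      by_cases hk0 : k = 0
      · left; subst hk0; push_cast; omega
      · right
        refine ⟨by omega, by omega, by omega, ?_⟩
        apply hnz _ _ (by omega) (by omega) (by omega)
        simp only [ring]
        omega)
  have hdownrange : ∀ j : Nat, j < (n-3*(k:Int)).toNat →
      0 ≤ (k:Int) + j*0 ∧ (k:Int) + j*0 ≤ 2*(k:Int) + j*1 ∧ 2*(k:Int) + j*1 < n := by
    intro j hj; omega
  have hs1 : Shape n (wRun 1 0 (n-3*(k:Int)).toNat g (2*(k:Int)) (k:Int) (num+1)) :=
    Shape_wRun 1 0 _ g _ _ _ hs hdownrange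
  have hg1 : ∀ x y : Int, 0 ≤ x → 0 ≤ y → y ≠ (k:Int) →
      aRead (wRun 1 0 (n-3*(k:Int)).toNat g (2*(k:Int)) (k:Int) (num+1)) x y = aRead g x y := by
    intro x y hx hy hne
    exact wRun_read_ne 1 0 _ g _ _ _ hs hdownrange x y hx hy (by intro j hj hc; omega)
  -- ----- the right phase -----
  have hright := aRight_eq (n := n) (n-3*(k:Int)-1).toNat (n.toNat+1)
    (wRun 1 0 (n-3*(k:Int)).toNat g (2*(k:Int)) (k:Int) (num+1))
    (2*(k:Int) + ((n-3*(k:Int)).toNat:Int) - 1) ((k:Int)+1) (num+1+((n-3*(k:Int)).toNat:Int))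
    (by omega) hs1
    (by intro j hj; omega)
    (by
      intro j hj
      rw [hg1 _ _ (by omega) (by omega) (by omega)]
      apply hz _ _ (by omega) (by omega) (by omega)
      simp only [ring]
      omega)
    (by
      by_cases hk0 : k = 0
      · left; subst hk0; push_cast at *; omega
      · right
        refine ⟨by omega, by omega, by omega, ?_⟩
        rw [hg1 _ _ (by omega) (by omega) (by omega)]
        apply hnz _ _ (by omega) (by omega) (by omega)
        simp only [ring]
        omega)
  have hrightrange : ∀ j : Nat, j < (n-3*(k:Int)-1).toNat →
      0 ≤ ((k:Int)+1) + j*1 ∧ ((k:Int)+1) + j*1 ≤ (n-(k:Int)-1) + j*0 ∧ (n-(k:Int)-1) + j*0 < n := by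
    intro j hj; omega
  have hs2 : Shape n (wRun 0 1 (n-3*(k:Int)-1).toNat
      (wRun 1 0 (n-3*(k:Int)).toNat g (2*(k:Int)) (k:Int) (num+1))
      (n-(k:Int)-1) ((k:Int)+1) (num + ((n-3*(k:Int)).toNat:Int) + 1)) :=
    Shape_wRun 0 1 _ _ _ _ _ hs1 hrightrange
  have hg2 : ∀ x y : Int, 0 ≤ x → 0 ≤ y → x ≠ n-(k:Int)-1 →
      aRead (wRun 0 1 (n-3*(k:Int)-1).toNat
        (wRun 1 0 (n-3*(k:Int)).toNat g (2*(k:Int)) (k:Int) (num+1))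
        (n-(k:Int)-1) ((k:Int)+1) (num + ((n-3*(k:Int)).toNat:Int) + 1)) x y
      = aRead (wRun 1 0 (n-3*(k:Int)).toNat g (2*(k:Int)) (k:Int) (num+1)) x y := by
    intro x y hx hy hne
    exact wRun_read_ne 0 1 _ _ _ _ _ hs1 hrightrange x y hx hy (by intro j hj hc; omega)
  have hat : aRead (wRun 1 0 (n-3*(k:Int)).toNat g (2*(k:Int)) (k:Int) (num+1))
      (2*(k:Int)) (k:Int) = some (num+1) := by
    have := wRun_read_at 1 0 (Or.inl ⟨rfl, rfl⟩) (n-3*(k:Int)).toNat 0 g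
      (2*(k:Int)) (k:Int) (num+1) (by omega) hs hdownrange
    norm_num at this
    exact this
  -- ----- the diagonal phase -----
  have hdiag := aDiag_eq (n := n) (n-3*(k:Int)-2).toNat (n.toNat+1)
    (wRun 0 1 (n-3*(k:Int)-1).toNat
      (wRun 1 0 (n-3*(k:Int)).toNat g (2*(k:Int)) (k:Int) (num+1))
      (n-(k:Int)-1) ((k:Int)+1) (num + ((n-3*(k:Int)).toNat:Int) + 1))
    (n-(k:Int)-2) ((k:Int) + ((n-3*(k:Int)-1).toNat:Int) - 1)
    (num+((n-3*(k:Int)).toNat:Int)+((n-3*(k:Int)-1).toNat:Int)+1)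
    (by omega) hs2
    (by intro j hj; omega)
    (by
      intro j hj
      rw [hg2 _ _ (by omega) (by omega) (by omega), hg1 _ _ (by omega) (by omega) (by omega)]
      apply hz _ _ (by omega) (by omega) (by omega)
      simp only [ring]
      omega)
    (by
      refine ⟨by omega, by omega, by omega, ?_⟩
      by_cases hc : n = 3*(k:Int)+1
      · have hk1 : 1 ≤ k := by omega
        rw [show (k:Int) + ((n-3*(k:Int)-1).toNat:Int) - 1 - ((n-3*(k:Int)-2).toNat:Int)
            = (k:Int)-1 from by omega,
          show n-(k:Int)-2 - ((n-3*(k:Int)-2).toNat:Int) = 2*(k:Int)-1 from by omega]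
        rw [hg2 _ _ (by omega) (by omega) (by omega), hg1 _ _ (by omega) (by omega) (by omega)]
        apply hnz _ _ (by omega) (by omega) (by omega)
        simp only [ring]
        omega
      · rw [show (k:Int) + ((n-3*(k:Int)-1).toNat:Int) - 1 - ((n-3*(k:Int)-2).toNat:Int)
            = (k:Int) from by omega,
          show n-(k:Int)-2 - ((n-3*(k:Int)-2).toNat:Int) = 2*(k:Int) from by omega]
        rw [hg2 _ _ (by omega) (by omega) (by omega), hat]
        intro hcon
        have : num + 1 = 0 := by injection hcon
        omega)
  -- ----- assemble -----
  simp only [aLap]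
  rw [hdown]
  simp only
  rw [show 2*(k:Int) + ((n-3*(k:Int)).toNat:Int) - 1 = n-(k:Int)-1 from by omega] at hright ⊢
  rw [show num + 1 + ((n-3*(k:Int)).toNat:Int) = num + ((n-3*(k:Int)).toNat:Int) + 1
    from by ring] at hright ⊢
  rw [hright]
  simp only
  rw [show (k:Int) + 1 + ((n-3*(k:Int)-1).toNat:Int) - 1 - 1
      = (k:Int) + ((n-3*(k:Int)-1).toNat:Int) - 1 from by ring,
    show n-(k:Int)-1-1 = n-(k:Int)-2 from by ring,
    show num + ((n-3*(k:Int)).toNat:Int) + 1 + ((n-3*(k:Int)-1).toNat:Int)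
      = num+((n-3*(k:Int)).toNat:Int)+((n-3*(k:Int)-1).toNat:Int)+1 from by ring]
  rw [hdiag]
  simp only [lapG]
  refine Prod.ext rfl ?_
  show num+((n-3*(k:Int)).toNat:Int)+((n-3*(k:Int)-1).toNat:Int)+1 + ((n-3*(k:Int)-2).toNat:Int) = _
  ring

lemma Shape_lapG (n : Int) (k : Nat) (g : List (List Int)) (num : Int)
    (hk : 3*(k:Int) < n) (hs : Shape n g) : Shape n (lapG n k g num) := by
  unfold lapG
  refine Shape_wRun _ _ _ _ _ _ _ (Shape_wRun _ _ _ _ _ _ _ (Shape_wRun _ _ _ _ _ _ _ hs ?_) ?_) ?_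
  · intro j hj; omega
  · intro j hj; omega
  · intro j hj; omega

lemma ZInv_lapG (n : Int) (k : Nat) (g : List (List Int)) (num : Int)
    (h2n : 2 ≤ n) (hk : 3*(k:Int) < n) (hs : Shape n g) (hnum : 0 ≤ num) (hI : ZInv n k g) :
    ZInv n (k+1) (lapG n k g num) := by
  unfold ZInv at hI ⊢
  have hdownrange : ∀ j : Nat, j < (n-3*(k:Int)).toNat →
      0 ≤ (k:Int) + j*0 ∧ (k:Int) + j*0 ≤ 2*(k:Int) + j*1 ∧ 2*(k:Int) + j*1 < n := by
    intro j hj; omega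
  have hs1 : Shape n (wRun 1 0 (n-3*(k:Int)).toNat g (2*(k:Int)) (k:Int) (num+1)) :=
    Shape_wRun 1 0 _ g _ _ _ hs hdownrange
  have hrightrange : ∀ j : Nat, j < (n-3*(k:Int)-1).toNat →
      0 ≤ ((k:Int)+1) + j*1 ∧ ((k:Int)+1) + j*1 ≤ (n-(k:Int)-1) + j*0 ∧ (n-(k:Int)-1) + j*0 < n := by
    intro j hj; omega
  have hs2 : Shape n (wRun 0 1 (n-3*(k:Int)-1).toNat
      (wRun 1 0 (n-3*(k:Int)).toNat g (2*(k:Int)) (k:Int) (num+1))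
      (n-(k:Int)-1) ((k:Int)+1) (num + ((n-3*(k:Int)).toNat:Int) + 1)) :=
    Shape_wRun 0 1 _ _ _ _ _ hs1 hrightrange
  have hdiagrange : ∀ j : Nat, j < (n-3*(k:Int)-2).toNat →
      0 ≤ ((k:Int) + ((n-3*(k:Int)-1).toNat:Int) - 1) + j*(-1) ∧
      ((k:Int) + ((n-3*(k:Int)-1).toNat:Int) - 1) + j*(-1) ≤ (n-(k:Int)-2) + j*(-1) ∧
      (n-(k:Int)-2) + j*(-1) < n := by
    intro j hj; omega
  intro x y h1 h2 h3
  have hring : ring n x y = min y (min (x - y) (n - 1 - x)) := rfl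
  rcases lt_trichotomy (ring n x y) (k:Int) with hlt | heq | hgt
  · -- untouched, was already nonzero
    obtain ⟨v, hv, hiff⟩ := hI x y h1 h2 h3
    refine ⟨v, ?_, by omega⟩
    unfold lapG
    rw [wRun_read_ne (-1) (-1) _ _ _ _ _ hs2 hdiagrange x y (by omega) h1
        (by intro j hj hc; simp only [ring] at hlt; omega),
      wRun_read_ne 0 1 _ _ _ _ _ hs1 hrightrange x y (by omega) h1
        (by intro j hj hc; simp only [ring] at hlt; omega),
      wRun_read_ne 1 0 _ g _ _ _ hs hdownrange x y (by omega) h1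
        (by intro j hj hc; simp only [ring] at hlt; omega)]
    exact hv
  · -- ring = k: this lap wrote the cell, with a positive value
    simp only [ring] at heq
    by_cases hy : y = (k:Int)
    · -- down segment
      obtain ⟨j0, hj0, hx0, hy0⟩ : ∃ j : Nat, j < (n-3*(k:Int)).toNat ∧
          x = 2*(k:Int) + (j:Int)*1 ∧ y = (k:Int) + (j:Int)*0 :=
        ⟨(x-2*(k:Int)).toNat, by omega, by omega, by omega⟩
      subst hx0; subst hy0
      refine ⟨num + 1 + (j0:Int), ?_, by omega⟩
      unfold lapG
      rw [wRun_read_ne (-1) (-1) _ _ _ _ _ hs2 hdiagrange _ _ (by omega) (by omega)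
          (by intro j hj hc; omega),
        wRun_read_ne 0 1 _ _ _ _ _ hs1 hrightrange _ _ (by omega) (by omega)
          (by intro j hj hc; omega)]
      exact wRun_read_at 1 0 (Or.inl ⟨rfl, rfl⟩) _ j0 g _ _ _ hj0 hs hdownrange
    · by_cases hx : x = n-(k:Int)-1
      · -- right segment
        obtain ⟨j1, hj1, hx1, hy1⟩ : ∃ j : Nat, j < (n-3*(k:Int)-1).toNat ∧
            x = (n-(k:Int)-1) + (j:Int)*0 ∧ y = ((k:Int)+1) + (j:Int)*1 :=
          ⟨(y-(k:Int)-1).toNat, by omega, by omega, by omega⟩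
        subst hx1; subst hy1
        refine ⟨num + ((n-3*(k:Int)).toNat:Int) + 1 + (j1:Int), ?_, by omega⟩
        unfold lapG
        rw [wRun_read_ne (-1) (-1) _ _ _ _ _ hs2 hdiagrange _ _ (by omega) (by omega)
            (by intro j hj hc; omega)]
        exact wRun_read_at 0 1 (Or.inr (Or.inl ⟨rfl, rfl⟩)) _ j1 _ _ _ _ hj1 hs1 hrightrange
      · -- diagonal segment
        obtain ⟨j2, hj2, hx2, hy2⟩ : ∃ j : Nat, j < (n-3*(k:Int)-2).toNat ∧
            x = (n-(k:Int)-2) + (j:Int)*(-1) ∧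
            y = ((k:Int) + ((n-3*(k:Int)-1).toNat:Int) - 1) + (j:Int)*(-1) :=
          ⟨(n-(k:Int)-2-x).toNat, by omega, by omega, by omega⟩
        subst hx2; subst hy2
        refine ⟨num + ((n-3*(k:Int)).toNat:Int) + ((n-3*(k:Int)-1).toNat:Int) + 1 + (j2:Int),
          ?_, by omega⟩
        unfold lapG
        exact wRun_read_at (-1) (-1) (Or.inr (Or.inr ⟨rfl, rfl⟩)) _ j2 _ _ _ _ hj2 hs2 hdiagrange
  · -- ring > k: still zero
    obtain ⟨v, hv, hiff⟩ := hI x y h1 h2 h3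
    refine ⟨v, ?_, by omega⟩
    unfold lapG
    rw [wRun_read_ne (-1) (-1) _ _ _ _ _ hs2 hdiagrange x y (by omega) h1
        (by intro j hj hc; simp only [ring] at hgt; omega),
      wRun_read_ne 0 1 _ _ _ _ _ hs1 hrightrange x y (by omega) h1
        (by intro j hj hc; simp only [ring] at hgt; omega),
      wRun_read_ne 1 0 _ g _ _ _ hs hdownrange x y (by omega) h1
        (by intro j hj hc; simp only [ring] at hgt; omega)]
    exact hv

lemma hasZero_iff (n : Int) (g : List (List Int)) (hs : Shape n g) :
    hasZero g = true ↔ ∃ x y : Int, 0 ≤ y ∧ y ≤ x ∧ x < n ∧ aRead g x y = some 0 := by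
  unfold hasZero
  rw [List.any_eq_true]
  constructor
  · rintro ⟨row, hrow, hany⟩
    rw [List.any_eq_true] at hany
    obtain ⟨e, he, he0⟩ := hany
    rw [beq_iff_eq] at he0
    subst he0
    obtain ⟨r, hr, hrow'⟩ := List.mem_iff_getElem.mp hrow
    obtain ⟨c, hc, he'⟩ := List.mem_iff_getElem.mp he
    have hlen : row.length = r + 1 := hs.2 r row (by rw [List.getElem?_eq_getElem hr, hrow'])
    have hglen := hs.1
    refine ⟨(r:Int), (c:Int), by omega, by omega, by omega, ?_⟩
    rw [aRead_nonneg _ _ _ (by omega) (by omega)]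
    simp only [Int.toNat_natCast]
    rw [List.getElem?_eq_getElem hr, hrow']
    simp only [Option.bind_some]
    rw [List.getElem?_eq_getElem hc, he']
  · rintro ⟨x, y, h1, h2, h3, hread⟩
    rw [aRead_nonneg _ _ _ (by omega) h1] at hread
    cases hg : g[x.toNat]? with
    | none => rw [hg] at hread; simp at hread
    | some row =>
      rw [hg] at hread
      simp only [Option.bind_some] at hread
      have hrm : row ∈ g := List.mem_of_getElem? hg
      refine ⟨row, hrm, ?_⟩
      rw [List.any_eq_true]
      exact ⟨0, List.mem_of_getElem? hread, by simp⟩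

lemma hasZero_of_ZInv (n : Int) (K : Nat) (g : List (List Int)) (hs : Shape n g)
    (hI : ZInv n K g) : hasZero g = true ↔ 3*(K:Int) + 1 ≤ n := by
  rw [hasZero_iff n g hs]
  unfold ZInv at hI
  constructor
  · rintro ⟨x, y, h1, h2, h3, hread⟩
    obtain ⟨v, hv, hiff⟩ := hI x y h1 h2 h3
    rw [hv] at hread
    have hv0 : v = 0 := by injection hread
    have := hiff.mp hv0
    simp only [ring] at this
    omega
  · intro hn
    refine ⟨2*(K:Int), (K:Int), by omega, by omega, by omega, ?_⟩
    obtain ⟨v, hv, hiff⟩ := hI (2*(K:Int)) (K:Int) (by omega) (by omega) (by omega)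
    rw [hv, hiff.mpr (by simp only [ring]; omega)]

-- B's remaining fold, from segment 3k on
def bTail (n : Int) (k : Nat) (st : List (List Int) × Int × Int × Int) :
    List (List Int) × Int × Int × Int :=
  (PySem.List.pyRange (3*(k:Int)) n 1).foldl (bSeg n) st

lemma bTail_step (n : Int) (k : Nat) (st : List (List Int) × Int × Int × Int)
    (hk : 3*(k:Int) < n) : bTail n k st = bTail n (k+1) (lapB n k st) := by
  unfold bTail lapB
  have ecast : (3*((k+1:Nat)):Int) = 3*(k:Int)+3 := by push_cast; ring
  rw [ecast]
  by_cases hbig : 3*(k:Int)+3 ≤ n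
  · rw [PySem.List.pyRange_one_append (3*(k:Int)) (3*(k:Int)+3) n (by omega) hbig,
      List.foldl_append,
      PySem.List.pyRange_one_cons (by omega : 3*(k:Int) < 3*(k:Int)+3),
      PySem.List.pyRange_one_cons (by omega : 3*(k:Int)+1 < 3*(k:Int)+3),
      show (3*(k:Int)+1+1) = 3*(k:Int)+2 from by ring,
      PySem.List.pyRange_one_cons (by omega : 3*(k:Int)+2 < 3*(k:Int)+3),
      show (3*(k:Int)+2+1) = 3*(k:Int)+3 from by ring,
      PySem.List.pyRange_one_eq_nil (le_refl (3*(k:Int)+3))]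
    simp only [List.foldl_cons, List.foldl_nil]
  · rw [PySem.List.pyRange_one_eq_nil (by omega : n ≤ 3*(k:Int)+3)]
    simp only [List.foldl_nil]
    by_cases h1 : n = 3*(k:Int)+1
    · rw [PySem.List.pyRange_one_cons (by omega : 3*(k:Int) < n),
        PySem.List.pyRange_one_eq_nil (by omega : n ≤ 3*(k:Int)+1)]
      simp only [List.foldl_cons, List.foldl_nil]
      rw [bSeg_id n (3*(k:Int)+1) _ (by omega), bSeg_id n (3*(k:Int)+2) _ (by omega)]
    · rw [PySem.List.pyRange_one_cons (by omega : 3*(k:Int) < n),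
        PySem.List.pyRange_one_cons (by omega : 3*(k:Int)+1 < n),
        show (3*(k:Int)+1+1) = 3*(k:Int)+2 from by ring,
        PySem.List.pyRange_one_eq_nil (by omega : n ≤ 3*(k:Int)+2)]
      simp only [List.foldl_cons, List.foldl_nil]
      rw [bSeg_id n (3*(k:Int)+2) _ (by omega)]

lemma loop_eq (n : Int) (h2n : 2 ≤ n) : ∀ (fuel : Nat) (k : Nat) (g : List (List Int)) (num : Int),
    3*(k:Int) < n → n ≤ 3*(k:Int) + 3*(fuel:Int) → Shape n g → 0 ≤ num → ZInv n k g →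
    aLoop fuel g (num+1) (k:Int) n = (bTail n k (g, 2*(k:Int)-1, (k:Int), num)).1 := by
  intro fuel
  induction fuel with
  | zero =>
    intro k g num hk hb _ _ _
    exact absurd hb (by omega)
  | succ fuel ih =>
    intro k g num hk hb hs hnum hI
    show (if hasZero (aLap n g (num+1) (k:Int)).1 then
        aLoop fuel (aLap n g (num+1) (k:Int)).1 (aLap n g (num+1) (k:Int)).2 ((k:Int)+1) n
      else (aLap n g (num+1) (k:Int)).1) = _
    rw [lapA_val n k g num h2n hk hs hnum hI]
    have hs3 : Shape n (lapG n k g num) := Shape_lapG n k g num hk hs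
    have hI3 : ZInv n (k+1) (lapG n k g num) := ZInv_lapG n k g num h2n hk hs hnum hI
    have hz3 := hasZero_of_ZInv n (k+1) (lapG n k g num) hs3 hI3
    rw [bTail_step n k _ hk, lapB_val n k g num hk]
    by_cases hcont : 3*(k:Int)+4 ≤ n
    · rw [if_pos (hz3.mpr (by push_cast; omega))]
      show aLoop fuel (lapG n k g num)
          ((num + ((n-3*(k:Int)).toNat:Int) + ((n-3*(k:Int)-1).toNat:Int)
            + ((n-3*(k:Int)-2).toNat:Int)) + 1) ((k:Int)+1) n = _
      rw [show ((k:Int)+1) = ((k+1:Nat):Int) from by push_cast; ring,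
        show 2*(k:Int)-1 + ((n-3*(k:Int)).toNat:Int) - ((n-3*(k:Int)-2).toNat:Int)
          = 2*((k+1:Nat):Int)-1 from by push_cast; omega,
        show (k:Int) + ((n-3*(k:Int)-1).toNat:Int) - ((n-3*(k:Int)-2).toNat:Int)
          = ((k+1:Nat):Int) from by push_cast; omega]
      exact ih (k+1) (lapG n k g num) _ (by push_cast; omega) (by push_cast; omega)
        hs3 (by positivity) hI3
    · rw [if_neg (by
        intro hcon
        exact absurd (hz3.mp hcon) (by push_cast; omega))]
      unfold bTail
      rw [PySem.List.pyRange_one_eq_nil (by push_cast; omega)]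
      rfl

lemma init_getElem (n : Int) (r : Nat) (hr : r < n.toNat) :
    ((PySem.List.pyRange 1 (n+1) 1).map (fun i => List.replicate i.toNat 0 : Int → List Int))[r]?
      = some (List.replicate (r+1) (0:Int)) := by
  rw [List.getElem?_map, PySem.List.pyRange_one, List.getElem?_map,
    List.getElem?_range (by omega : r < (n+1-1).toNat)]
  simp only [Option.map_some]
  congr 1
  congr 1
  omega

lemma Shape_init (n : Int) (h : 1 ≤ n) :
    Shape n ((PySem.List.pyRange 1 (n+1) 1).map (fun i => List.replicate i.toNat 0)) := by
  constructor
  · rw [List.length_map, PySem.List.length_pyRange_one]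
    omega
  · intro r row hr
    rw [List.getElem?_map, PySem.List.pyRange_one, List.getElem?_map] at hr
    by_cases hb : r < (n+1-1).toNat
    · rw [List.getElem?_range hb] at hr
      simp only [Option.map_some, Option.some.injEq] at hr
      subst hr
      simp only [List.length_replicate]
      omega
    · rw [List.getElem?_eq_none (by simpa using hb)] at hr
      simp at hr

lemma ZInv_init (n : Int) (h : 1 ≤ n) :
    ZInv n 0 ((PySem.List.pyRange 1 (n+1) 1).map (fun i => List.replicate i.toNat 0)) := by
  unfold ZInv
  intro x y h1 h2 h3
  refine ⟨0, ?_, ⟨fun _ => by simp only [ring]; omega, fun _ => rfl⟩⟩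
  rw [aRead_nonneg _ _ _ (by omega) h1]
  rw [init_getElem n x.toNat (by omega)]
  simp only [Option.bind_some]
  rw [List.getElem?_replicate, if_pos (by omega)]

lemma foldl_append_inner : ∀ (l : List Int) (a : List Int),
    l.foldl (fun a e => a ++ [e]) a = a ++ l := by
  intro l
  induction l with
  | nil => intro a; simp
  | cons e l ih => intro a; simp [List.foldl_cons, ih]

lemma foldl_append_outer : ∀ (g : List (List Int)) (acc : List Int),
    g.foldl (fun acc l => l.foldl (fun a e => a ++ [e]) acc) acc = acc ++ g.flatten := by
  intro g
  induction g with
  | nil => intro acc; simp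
  | cons l g ih =>
    intro acc
    rw [List.foldl_cons, foldl_append_inner, ih, List.flatten_cons, List.append_assoc]

-- ===== VERDICT (by name: the statement is the Claim_ definition above) =====
lemma loop_eq0 (n : Int) (h2n : 2 ≤ n) (g : List (List Int)) (hs : Shape n g)
    (hI : ZInv n 0 g) : aLoop (n.toNat+1) g 1 0 n = (bTail n 0 (g, -1, 0, 0)).1 := by
  have h := loop_eq n h2n (n.toNat+1) 0 g 0 (by push_cast; omega) (by push_cast; omega)
    hs (le_refl 0) hI
  norm_num at h
  exact h

theorem solution_spec : Claim_equal_solution := by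
  unfold Claim_equal_solution
  intro n _ hpre
  unfold Spec_solution
  unfold Pre_solution at hpre
  by_cases h1 : n = 1
  · subst h1; decide
  · have h2n : 2 ≤ n := by omega
    simp only [solution, solution_alt]
    rw [foldl_append_outer, List.nil_append,
      loop_eq0 n h2n _ (Shape_init n (by omega)) (ZInv_init n (by omega))]
    unfold bTail
    norm_num
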